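-- pv_equiv track=rewrite | github.com/NeoBitose/Codingan_kuliah | Functional Programming/Presentasi/dekontruksi.py | rekursiveFilter
-- ===== SOURCE A (Python) =====
-- def rekursiveFilter(arry, genap, a=0) :
--   if a == len(arry)-1:
--     genap += [arry[a]]
--     return genap
--   else :
--     if arry[a] % 2 == 0 :
--       genap += [arry[a]]
--     return rekursiveFilter(arry, genap, a+1)
-- ===== SOURCE B (Python) =====
-- def rekursiveFilter(arry, genap, a=0):
--     # Iterative rewrite: explicit loop instead of recursion; same in-place += mutation of genap.
--     while a != len(arry) - 1:
--         if arry[a] % 2 == 0: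
--             genap += [arry[a]]
--         a += 1
--     genap += [arry[a]]
--     return genap
-- ===== Notes on version B (the rewrite author's own statement) =====
-- stated objective: simpler
-- what changed: Replaces the recursion (one stack frame per element) with a plain while loop over the same index, keeping the in-place += mutation and the unconditional final append.
import Mathlib
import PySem

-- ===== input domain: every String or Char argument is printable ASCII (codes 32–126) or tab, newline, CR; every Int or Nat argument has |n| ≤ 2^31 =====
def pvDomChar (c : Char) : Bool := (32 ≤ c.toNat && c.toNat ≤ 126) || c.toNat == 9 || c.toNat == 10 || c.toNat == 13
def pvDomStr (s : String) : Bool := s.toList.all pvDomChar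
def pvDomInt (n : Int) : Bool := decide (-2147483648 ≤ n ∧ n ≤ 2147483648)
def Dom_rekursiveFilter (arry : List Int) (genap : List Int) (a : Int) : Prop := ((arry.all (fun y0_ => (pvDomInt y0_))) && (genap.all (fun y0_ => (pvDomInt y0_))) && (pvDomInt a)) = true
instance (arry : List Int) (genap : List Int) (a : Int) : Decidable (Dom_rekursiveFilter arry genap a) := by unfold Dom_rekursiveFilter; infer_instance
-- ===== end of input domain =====

-- B replaces A's recursion (one stack frame per element) by a plain while loop over the same
-- index; objective: simpler. A mutates `genap` in place via `+=` and B performs the same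
-- mutation; the equivalence proved here is about the return value.

-- ===== PORT A =====
-- Recursion of Source A, step for step. Where Python raises IndexError (arry[a] out of range,
-- excluded by Pre_) the port returns a dummy value.
def rekursiveFilter (arry : List Int) (genap : List Int) (a : Int) : List Int :=
  if a = (arry.length : Int) - 1 then
    genap ++ [(PySem.List.pyGet? arry a).getD 0]
  else
    match hx : PySem.List.pyGet? arry a with
    | none => genap          -- IndexError in Python; outside Pre_
    | some x =>
      let genap' := if PySem.Int.mod x 2 = 0 then genap ++ [x] else genap
      rekursiveFilter arry genap' (a + 1)
termination_by ((arry.length : Int) - 1 - a).toNat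
decreasing_by
  have h : ¬ PySem.List.pyGet? arry a = none := by simp [hx]
  rw [PySem.List.pyGet?_eq_none_iff, not_not] at h
  obtain ⟨_, h2⟩ := h
  omega

-- ===== PORT B =====
-- The while loop of Source B: state = (genap, a); fuel bounds the iterations (inside Pre_ the
-- loop runs (len-1-a) ≤ 2*len times, so the fuel is never exhausted there).
def rekursiveFilterAltLoop (arry : List Int) : Nat → List Int → Int → List Int × Int
  | 0, genap, a => (genap, a)
  | fuel + 1, genap, a =>
    if a = (arry.length : Int) - 1 then (genap, a)
    else
      match PySem.List.pyGet? arry a with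
      | none => (genap, a)   -- IndexError in Python; outside Pre_
      | some x =>
        rekursiveFilterAltLoop arry fuel
          (if PySem.Int.mod x 2 = 0 then genap ++ [x] else genap) (a + 1)

def rekursiveFilter_alt (arry : List Int) (genap : List Int) (a : Int) : List Int :=
  let st := rekursiveFilterAltLoop arry (2 * arry.length + 1) genap a
  st.1 ++ [(PySem.List.pyGet? arry st.2).getD 0]

-- ===== PRECONDITION & SPEC =====
-- Pre_ = exactly the inputs on which Python's A returns: arry nonempty and -len ≤ a ≤ len-1
-- (otherwise the recursion hits an out-of-range arry[a] and raises IndexError).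
def Pre_rekursiveFilter (arry : List Int) (genap : List Int) (a : Int) : Prop :=
  arry ≠ [] ∧ -(arry.length : Int) ≤ a ∧ a ≤ (arry.length : Int) - 1

instance (arry : List Int) (genap : List Int) (a : Int) : Decidable (Pre_rekursiveFilter arry genap a) := by unfold Pre_rekursiveFilter; infer_instance

def pvWitness_rekursiveFilter : List Int × List Int × Int := ([3, 4, 5, 6], [], 0)

def Spec_rekursiveFilter (arry : List Int) (genap : List Int) (a : Int) (out : List Int) : Prop := out = rekursiveFilter_alt arry genap a
instance (arry : List Int) (genap : List Int) (a : Int) (out : List Int) : Decidable (Spec_rekursiveFilter arry genap a out) := by unfold Spec_rekursiveFilter; infer_instance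

-- ===== CLAIM (what is proved, stated in full; the proofs are below) =====
def Claim_equal_rekursiveFilter : Prop := ∀ (arry : List Int) (genap : List Int) (a : Int), Dom_rekursiveFilter arry genap a → Pre_rekursiveFilter arry genap a → Spec_rekursiveFilter arry genap a (rekursiveFilter arry genap a)

-- ===== LEMMAS AND PROOFS =====

lemma rekursiveFilter_eq_loop (arry : List Int) :
    ∀ (fuel : Nat) (genap : List Int) (a : Int),
      -(arry.length : Int) ≤ a → a ≤ (arry.length : Int) - 1 →
      (((arry.length : Int) - 1 - a).toNat ≤ fuel) →
      rekursiveFilter arry genap a =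
        (rekursiveFilterAltLoop arry fuel genap a).1 ++
          [(PySem.List.pyGet? arry (rekursiveFilterAltLoop arry fuel genap a).2).getD 0] := by
  intro fuel
  induction fuel with
  | zero =>
    intro genap a h1 h2 hf
    have ha : a = (arry.length : Int) - 1 := by omega
    rw [rekursiveFilter]
    simp [rekursiveFilterAltLoop, ha]
  | succ fuel ih =>
    intro genap a h1 h2 hf
    rw [rekursiveFilter, rekursiveFilterAltLoop]
    by_cases ha : a = (arry.length : Int) - 1
    · simp [ha]
    · have hlt : a < (arry.length : Int) - 1 := by omega
      simp only [ha, if_false]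
      cases hx : PySem.List.pyGet? arry a with
      | none =>
        exfalso
        rw [PySem.List.pyGet?_eq_none_iff] at hx
        exact hx ⟨h1, by omega⟩
      | some x =>
        exact ih _ (a + 1) (by omega) (by omega) (by omega)

-- ===== VERDICT (by name: the statement is the Claim_ definition above) =====
theorem rekursiveFilter_spec : Claim_equal_rekursiveFilter := by
  intro arry genap a _ hpre
  obtain ⟨hne, h1, h2⟩ := hpre
  unfold Spec_rekursiveFilter rekursiveFilter_alt
  have hlen : (0 : Int) < arry.length := by
    have : arry.length ≠ 0 := fun h => hne (List.eq_nil_of_length_eq_zero h)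
    omega
  exact rekursiveFilter_eq_loop arry (2 * arry.length + 1) genap a h1 h2 (by omega)
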